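-- pv_equiv track=rewrite | github.com/ummayhanijaved/vqa_gi_thesis | src/eval_route1_fuzzy.py | has_discriminator_conflict
-- ===== SOURCE A (Python) =====
-- DISCRIMINATORS = [
--     # Distinct disease entities — never match each other
--     {"colitis", "ibd", "ulcerative colitis", "inflammatory bowel"},
--     {"esophagitis", "esophageal inflammation"},
--     {"polyp"},                   # polyp has many subtypes
--     {"adenoma", "adenomatous"},
--     {"paris-type", "paris type", "paris classification"},
--     {"colonoscopy", "colonoscopic"},
--     {"gastroscopy", "gastroscopic"},
-- ]
--
-- def has_discriminator_conflict(p: str, g: str) -> bool: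
--     """Return True if pred and gt mention DIFFERENT discriminator concepts."""
--     for group in DISCRIMINATORS:
--         p_hit = next((kw for kw in group if kw in p), None)
--         g_hit = next((kw for kw in group if kw in g), None)
--         # Only conflict if BOTH mention something from this group AND
--         # one mentions a discriminator the other doesn't
--         if p_hit and not g_hit:
--             # pred mentions discriminator, gt doesn't — possible conflict
--             for other in DISCRIMINATORS:
--                 if other is group: continue
--                 if any(kw in g for kw in other):
--                     return True
--         if g_hit and not p_hit:
--             for other in DISCRIMINATORS:
--                 if other is group: continue
--                 if any(kw in p for kw in other):
--                     return True
--     return False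
-- ===== SOURCE B (Python) =====
-- DISCRIMINATORS = [
--     {"colitis", "ibd", "ulcerative colitis", "inflammatory bowel"},
--     {"esophagitis", "esophageal inflammation"},
--     {"polyp"},
--     {"adenoma", "adenomatous"},
--     {"paris-type", "paris type", "paris classification"},
--     {"colonoscopy", "colonoscopic"},
--     {"gastroscopy", "gastroscopic"},
-- ]
--
-- def has_discriminator_conflict(p: str, g: str) -> bool:
--     """Return True if pred and gt mention DIFFERENT discriminator concepts."""
--     P = {i for i, grp in enumerate(DISCRIMINATORS) if any(kw in p for kw in grp)}
--     G = {i for i, grp in enumerate(DISCRIMINATORS) if any(kw in g for kw in grp)}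
--     return bool((P - G and G) or (G - P and P))
-- ===== Notes on version B (the rewrite author's own statement) =====
-- stated objective: simpler
-- what changed: B builds the two sets of discriminator-group indices hit by p and by g in one pass each, then decides the conflict with the closed-form set test (P-G and G) or (G-P and P), replacing A's per-group rescans of all other groups with early returns.
import Mathlib
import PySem

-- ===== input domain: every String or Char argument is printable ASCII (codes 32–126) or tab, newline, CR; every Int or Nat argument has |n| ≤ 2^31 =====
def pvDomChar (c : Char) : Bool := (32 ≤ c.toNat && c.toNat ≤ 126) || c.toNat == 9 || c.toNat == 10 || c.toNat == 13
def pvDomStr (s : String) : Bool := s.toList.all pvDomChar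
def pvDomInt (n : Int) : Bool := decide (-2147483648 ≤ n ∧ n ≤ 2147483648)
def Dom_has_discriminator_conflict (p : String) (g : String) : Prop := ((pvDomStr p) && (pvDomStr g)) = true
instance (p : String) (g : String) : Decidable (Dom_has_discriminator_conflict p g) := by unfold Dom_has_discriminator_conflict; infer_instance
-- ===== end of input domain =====

-- B builds the two sets of group indices hit by p and by g once, then uses the closed-form
-- set test ((P\G ≠ ∅ ∧ G ≠ ∅) ∨ (G\P ≠ ∅ ∧ P ≠ ∅)) instead of A's per-group rescans; objective: simpler.

-- ===== PORT A =====
def pvD : List (List String) :=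
  [ ["colitis", "ibd", "ulcerative colitis", "inflammatory bowel"],
    ["esophagitis", "esophageal inflammation"],
    ["polyp"],
    ["adenoma", "adenomatous"],
    ["paris-type", "paris type", "paris classification"],
    ["colonoscopy", "colonoscopic"],
    ["gastroscopy", "gastroscopic"] ]

-- inner 'for other in DISCRIMINATORS: if other is group: continue; if any(kw in s for kw in other): return True'
-- ('other is group' becomes an index comparison: the seven literal groups are distinct objects)
def pvOther (s : String) (i : Int) : Bool :=
  (PySem.List.enumerate pvD).any (fun x => x.1 != i && x.2.any (fun kw => PySem.Str.isIn kw s))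

def pvALoop (p : String) (g : String) : List (Int × List String) → Bool
  | [] => false
  | (i, grp) :: rest =>
    let p_hit := grp.find? (fun kw => PySem.Str.isIn kw p)   -- next((kw for kw in group if kw in p), None)
    let g_hit := grp.find? (fun kw => PySem.Str.isIn kw g)
    if p_hit.isSome && !g_hit.isSome && pvOther g i then true
    else if g_hit.isSome && !p_hit.isSome && pvOther p i then true
    else pvALoop p g rest

def has_discriminator_conflict (p : String) (g : String) : Bool :=
  pvALoop p g (PySem.List.enumerate pvD)

-- ===== PORT B =====
def has_discriminator_conflict_alt (p : String) (g : String) : Bool :=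
  let P := ((PySem.List.enumerate pvD).filter (fun x => x.2.any (fun kw => PySem.Str.isIn kw p))).map Prod.fst
  let G := ((PySem.List.enumerate pvD).filter (fun x => x.2.any (fun kw => PySem.Str.isIn kw g))).map Prod.fst
  (!(P.filter (fun i => !G.contains i)).isEmpty && !G.isEmpty) ||
  (!(G.filter (fun i => !P.contains i)).isEmpty && !P.isEmpty)

-- ===== PRECONDITION & SPEC =====
def Spec_has_discriminator_conflict (p : String) (g : String) (out : Bool) : Prop := out = has_discriminator_conflict_alt p g
instance (p : String) (g : String) (out : Bool) : Decidable (Spec_has_discriminator_conflict p g out) := by unfold Spec_has_discriminator_conflict; infer_instance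

-- ===== CLAIM (what is proved, stated in full; the proofs are below) =====
def Claim_equal_has_discriminator_conflict : Prop := ∀ (p : String) (g : String), Dom_has_discriminator_conflict p g → Spec_has_discriminator_conflict p g (has_discriminator_conflict p g)

-- ===== LEMMAS AND PROOFS =====
theorem pvFind?_isSome_eq_any {α : Type} (l : List α) (f : α → Bool) : (l.find? f).isSome = l.any f := by
  induction l with
  | nil => rfl
  | cons x xs ih => by_cases h : f x <;> simp [h, ih]

-- ===== VERDICT (by name: the statement is the Claim_ definition above) =====
set_option maxHeartbeats 4000000 in
theorem has_discriminator_conflict_spec : Claim_equal_has_discriminator_conflict := by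
  intro p g _
  unfold Spec_has_discriminator_conflict has_discriminator_conflict has_discriminator_conflict_alt
  simp only [pvD, PySem.List.enumerate_cons, PySem.List.enumerate_nil, pvALoop, pvOther,
    pvFind?_isSome_eq_any, List.any_cons, List.any_nil, List.filter]
  generalize (PySem.Str.isIn "colitis" p || (PySem.Str.isIn "ibd" p || (PySem.Str.isIn "ulcerative colitis" p || (PySem.Str.isIn "inflammatory bowel" p || false)))) = a0
  generalize (PySem.Str.isIn "colitis" g || (PySem.Str.isIn "ibd" g || (PySem.Str.isIn "ulcerative colitis" g || (PySem.Str.isIn "inflammatory bowel" g || false)))) = b0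
  generalize (PySem.Str.isIn "esophagitis" p || (PySem.Str.isIn "esophageal inflammation" p || false)) = a1
  generalize (PySem.Str.isIn "esophagitis" g || (PySem.Str.isIn "esophageal inflammation" g || false)) = b1
  generalize (PySem.Str.isIn "polyp" p || false) = a2
  generalize (PySem.Str.isIn "polyp" g || false) = b2
  generalize (PySem.Str.isIn "adenoma" p || (PySem.Str.isIn "adenomatous" p || false)) = a3
  generalize (PySem.Str.isIn "adenoma" g || (PySem.Str.isIn "adenomatous" g || false)) = b3
  generalize (PySem.Str.isIn "paris-type" p || (PySem.Str.isIn "paris type" p || (PySem.Str.isIn "paris classification" p || false))) = a4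
  generalize (PySem.Str.isIn "paris-type" g || (PySem.Str.isIn "paris type" g || (PySem.Str.isIn "paris classification" g || false))) = b4
  generalize (PySem.Str.isIn "colonoscopy" p || (PySem.Str.isIn "colonoscopic" p || false)) = a5
  generalize (PySem.Str.isIn "colonoscopy" g || (PySem.Str.isIn "colonoscopic" g || false)) = b5
  generalize (PySem.Str.isIn "gastroscopy" p || (PySem.Str.isIn "gastroscopic" p || false)) = a6
  generalize (PySem.Str.isIn "gastroscopy" g || (PySem.Str.isIn "gastroscopic" g || false)) = b6
  revert a0 b0 a1 b1 a2 b2 a3 b3 a4 b4 a5 b5 a6 b6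
  decide
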